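-- pv_equiv track=rewrite | github.com/lakemind-ai/lakemind-universe | lakemind-api-service/app/api/scan_route.py | _infer_entity_name
-- ===== SOURCE A (Python) =====
-- def _infer_entity_name(schema_name: str, table_name: str) -> str:
--     """
--     Infer entity name from table naming conventions.
--     E.g., 'dim_customer' -> 'customer', 'fact_orders' -> 'orders',
--     'stg_payments' -> 'payments'.
--     """
--     prefixes = ("dim_", "fact_", "stg_", "raw_", "silver_", "gold_", "bronze_")
--     name = table_name.lower()
--     for prefix in prefixes:
--         if name.startswith(prefix):
--             name = name[len(prefix):]
--             break
--     # Remove common suffixes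
--     suffixes = ("_history", "_snapshot", "_latest", "_v2", "_v1")
--     for suffix in suffixes:
--         if name.endswith(suffix):
--             name = name[: -len(suffix)]
--             break
--     return name
-- ===== SOURCE B (Python) =====
-- def _infer_entity_name(schema_name: str, table_name: str) -> str:
--     """Split at the first / last underscore and test the token against a set,
--     instead of scanning candidate prefixes/suffixes one by one."""
--     PREFIX_WORDS = {"dim", "fact", "stg", "raw", "silver", "gold", "bronze"}
--     SUFFIX_WORDS = {"history", "snapshot", "latest", "v2", "v1"}
--     name = table_name.lower()
--     head, sep, rest = name.partition("_")
--     if sep and head in PREFIX_WORDS: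
--         name = rest
--     base, sep, last = name.rpartition("_")
--     if sep and last in SUFFIX_WORDS:
--         name = base
--     return name
-- ===== Notes on version B (the rewrite author's own statement) =====
-- stated objective: idiomatic
-- what changed: Instead of scanning the tuple of candidate prefixes (suffixes) and testing startswith/endswith for each, B partitions the name at its first (last) underscore once and tests the resulting token for membership in a word set.
import Mathlib
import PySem

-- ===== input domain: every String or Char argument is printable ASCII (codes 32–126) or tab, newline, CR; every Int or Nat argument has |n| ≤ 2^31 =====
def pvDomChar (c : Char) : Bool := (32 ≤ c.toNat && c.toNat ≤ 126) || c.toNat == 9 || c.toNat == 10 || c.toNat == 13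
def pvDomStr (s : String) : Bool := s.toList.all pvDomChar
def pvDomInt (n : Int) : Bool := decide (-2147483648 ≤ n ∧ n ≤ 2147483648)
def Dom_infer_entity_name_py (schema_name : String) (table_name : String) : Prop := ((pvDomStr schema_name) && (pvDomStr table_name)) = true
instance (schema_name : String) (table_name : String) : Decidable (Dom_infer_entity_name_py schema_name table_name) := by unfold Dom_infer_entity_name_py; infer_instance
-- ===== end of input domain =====

-- B splits the name at the first / last underscore (partition/rpartition) and tests the token
-- against a word set, instead of scanning the candidate prefixes/suffixes one by one (idiomatic).


-- ===== PORT A =====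
-- the 'for prefix in prefixes: if name.startswith(prefix): name = name[len(prefix):]; break' loop
def pvForPrefixA (name : List Char) : List (List Char) → List Char
  | [] => name
  | p :: ps =>
      if PySem.Chars.startswith name p then PySem.List.slice name (some (p.length : Int)) none
      else pvForPrefixA name ps

-- the 'for suffix in suffixes: if name.endswith(suffix): name = name[:-len(suffix)]; break' loop
def pvForSuffixA (name : List Char) : List (List Char) → List Char
  | [] => name
  | s :: ss =>
      if PySem.Chars.endswith name s then PySem.List.slice name none (some (-(s.length : Int)))
      else pvForSuffixA name ss

def infer_entity_name_py (schema_name : String) (table_name : String) : String :=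
  let name := (PySem.Str.lower table_name).toList
  let name := pvForPrefixA name
      ["dim_".toList, "fact_".toList, "stg_".toList, "raw_".toList,
       "silver_".toList, "gold_".toList, "bronze_".toList]
  let name := pvForSuffixA name
      ["_history".toList, "_snapshot".toList, "_latest".toList, "_v2".toList, "_v1".toList]
  String.ofList name

-- ===== PORT B =====
-- hand port of str.partition("_"): scan left-to-right for the first '_';
-- none = separator absent (exact: Python returns (s, '', '') then, i.e. sep is falsy)
def pvPartitionUnd : List Char → Option (List Char × List Char)
  | [] => none
  | c :: cs =>
      if c = '_' then some ([], cs)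
      else match pvPartitionUnd cs with
           | none => none
           | some (h, t) => some (c :: h, t)

def pvPrefixWords : List (List Char) :=
  ["dim".toList, "fact".toList, "stg".toList, "raw".toList,
   "silver".toList, "gold".toList, "bronze".toList]

def pvSuffixWords : List (List Char) :=
  ["history".toList, "snapshot".toList, "latest".toList, "v2".toList, "v1".toList]

def infer_entity_name_py_alt (schema_name : String) (table_name : String) : String :=
  let name := (PySem.Str.lower table_name).toList
  -- head, sep, rest = name.partition("_"); if sep and head in PREFIX_WORDS: name = rest
  let name :=
    match pvPartitionUnd name with
    | some (head, rest) => if head ∈ pvPrefixWords then rest else name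
    | none => name
  -- base, sep, last = name.rpartition("_"); rpartition = partition of the reverse, pieces reversed
  let name :=
    match pvPartitionUnd name.reverse with
    | some (rlast, rbase) => if rlast.reverse ∈ pvSuffixWords then rbase.reverse else name
    | none => name
  String.ofList name

-- ===== PRECONDITION & SPEC =====
def Spec_infer_entity_name_py (schema_name : String) (table_name : String) (out : String) : Prop := out = infer_entity_name_py_alt schema_name table_name
instance (schema_name : String) (table_name : String) (out : String) : Decidable (Spec_infer_entity_name_py schema_name table_name out) := by unfold Spec_infer_entity_name_py; infer_instance

-- ===== CLAIM (what is proved, stated in full; the proofs are below) =====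
def Claim_equal_infer_entity_name_py : Prop := ∀ (schema_name : String) (table_name : String), Dom_infer_entity_name_py schema_name table_name → Spec_infer_entity_name_py schema_name table_name (infer_entity_name_py schema_name table_name)

-- ===== LEMMAS AND PROOFS =====

theorem pvPartitionUnd_none {l : List Char} (h : pvPartitionUnd l = none) : '_' ∉ l := by
  induction l with
  | nil => simp
  | cons c cs ih =>
    simp only [pvPartitionUnd] at h
    split_ifs at h with hc
    cases hp : pvPartitionUnd cs with
      | none =>
        simp only [List.mem_cons, not_or]
        exact ⟨fun e => hc e.symm, ih hp⟩
      | some p => rw [hp] at h; cases p; simp at h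

theorem pvPartitionUnd_some {l h t : List Char} (e : pvPartitionUnd l = some (h, t)) :
    l = h ++ '_' :: t ∧ '_' ∉ h := by
  induction l generalizing h t with
  | nil => simp [pvPartitionUnd] at e
  | cons c cs ih =>
    simp only [pvPartitionUnd] at e
    split_ifs at e with hc
    · subst hc
      simp only [Option.some.injEq, Prod.mk.injEq] at e
      obtain ⟨rfl, rfl⟩ := e
      simp
    · cases hp : pvPartitionUnd cs with
      | none => rw [hp] at e; simp at e
      | some p =>
        obtain ⟨h', t'⟩ := p
        rw [hp] at e
        simp only [Option.some.injEq, Prod.mk.injEq] at e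
        obtain ⟨rfl, rfl⟩ := e
        obtain ⟨ihl, ihm⟩ := ih hp
        refine ⟨by simp [ihl], ?_⟩
        simp only [List.mem_cons, not_or]
        exact ⟨fun e => hc e.symm, ihm⟩

theorem und_split_unique {w h t₁ t₂ : List Char} (hw : '_' ∉ w) (hh : '_' ∉ h)
    (e : w ++ '_' :: t₁ = h ++ '_' :: t₂) : w = h ∧ t₁ = t₂ := by
  induction w generalizing h with
  | nil =>
    cases h with
    | nil => simpa using e
    | cons d h' =>
      have : '_' = d := by simpa using congrArg (·.head?) e
      exact absurd (this ▸ List.mem_cons_self) hh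
  | cons c w' ih =>
    cases h with
    | nil =>
      have : c = '_' := by simpa using congrArg (·.head?) e
      exact absurd (this ▸ List.mem_cons_self) hw
    | cons d h' =>
      simp only [List.cons_append] at e
      obtain ⟨e1, e2⟩ := List.cons.injEq _ _ _ _ ▸ e
      have hw' : '_' ∉ w' := fun m => hw (List.mem_cons_of_mem _ m)
      have hh' : '_' ∉ h' := fun m => hh (List.mem_cons_of_mem _ m)
      obtain ⟨r1, r2⟩ := ih hw' hh' e2
      exact ⟨by rw [e1, r1], r2⟩

theorem startswith_und_iff {w h t : List Char} (hw : '_' ∉ w) (hh : '_' ∉ h) :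
    PySem.Chars.startswith (h ++ '_' :: t) (w ++ ['_']) = true ↔ w = h := by
  rw [PySem.Chars.startswith_iff]
  constructor
  · rintro ⟨r, hr⟩
    have : w ++ '_' :: r = h ++ '_' :: t := by simpa using hr
    exact (und_split_unique hw hh this).1
  · rintro rfl
    exact ⟨t, by simp⟩

theorem endswith_und_iff {s base last : List Char} (hs : '_' ∉ s) (hl : '_' ∉ last) :
    PySem.Chars.endswith (base ++ '_' :: last) ('_' :: s) = true ↔ s = last := by
  rw [PySem.Chars.endswith_iff]
  constructor
  · rintro ⟨r, hr⟩
    have hrev : s.reverse ++ '_' :: r.reverse = last.reverse ++ '_' :: base.reverse := by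
      have := congrArg List.reverse hr
      simpa using this
    have := und_split_unique (by simpa using hs) (by simpa using hl) hrev
    exact List.reverse_injective this.1
  · rintro rfl
    exact ⟨base, rfl⟩

theorem no_und_startswith {l p : List Char} (hl : '_' ∉ l) (hp : '_' ∈ p) :
    PySem.Chars.startswith l p = false := by
  rw [Bool.eq_false_iff]
  intro h
  exact hl ((PySem.Chars.startswith_iff _ _).1 h |>.mem hp)

theorem no_und_endswith {l p : List Char} (hl : '_' ∉ l) (hp : '_' ∈ p) :
    PySem.Chars.endswith l p = false := by
  rw [Bool.eq_false_iff]
  intro h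
  exact hl ((PySem.Chars.endswith_iff _ _).1 h |>.mem hp)

theorem loopPre_none {name : List Char} (hl : '_' ∉ name) :
    ∀ ps : List (List Char), (∀ p ∈ ps, '_' ∈ p) → pvForPrefixA name ps = name := by
  intro ps hps
  induction ps with
  | nil => rfl
  | cons p ps ih =>
    simp only [pvForPrefixA, no_und_startswith hl (hps p List.mem_cons_self)]
    simp only [Bool.false_eq_true, if_false]
    exact ih fun q hq => hps q (List.mem_cons_of_mem _ hq)

theorem loopSuf_none {name : List Char} (hl : '_' ∉ name) :
    ∀ ss : List (List Char), (∀ s ∈ ss, '_' ∈ s) → pvForSuffixA name ss = name := by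
  intro ss hss
  induction ss with
  | nil => rfl
  | cons s ss ih =>
    simp only [pvForSuffixA, no_und_endswith hl (hss s List.mem_cons_self)]
    simp only [Bool.false_eq_true, if_false]
    exact ih fun q hq => hss q (List.mem_cons_of_mem _ hq)

theorem loopPre_some {h t : List Char} (hh : '_' ∉ h) :
    ∀ ws : List (List Char), (∀ w ∈ ws, '_' ∉ w) →
      pvForPrefixA (h ++ '_' :: t) (ws.map (· ++ ['_'])) =
        if h ∈ ws then t else h ++ '_' :: t := by
  intro ws hws
  induction ws with
  | nil => simp [pvForPrefixA]
  | cons w ws ih =>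
    have hw : '_' ∉ w := hws w List.mem_cons_self
    simp only [List.map_cons, pvForPrefixA]
    by_cases hwh : w = h
    · subst hwh
      rw [if_pos ((startswith_und_iff hw hw).2 rfl)]
      rw [if_pos List.mem_cons_self]
      rw [PySem.List.slice_from_natCast]
      rw [show w ++ '_' :: t = (w ++ ['_']) ++ t by simp]
      exact List.drop_left
    · rw [if_neg (by simp [startswith_und_iff hw hh, hwh])]
      rw [ih fun q hq => hws q (List.mem_cons_of_mem _ hq)]
      have hmem : (h ∈ w :: ws) ↔ (h ∈ ws) := by
        rw [List.mem_cons]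
        exact or_iff_right fun e => hwh e.symm
      simp only [hmem]

theorem loopSuf_some {base last : List Char} (hl : '_' ∉ last) :
    ∀ ws : List (List Char), (∀ w ∈ ws, '_' ∉ w) →
      pvForSuffixA (base ++ '_' :: last) (ws.map ('_' :: ·)) =
        if last ∈ ws then base else base ++ '_' :: last := by
  intro ws hws
  induction ws with
  | nil => simp [pvForSuffixA]
  | cons w ws ih =>
    have hw : '_' ∉ w := hws w List.mem_cons_self
    simp only [List.map_cons, pvForSuffixA]
    by_cases hwl : w = last
    · subst hwl
      rw [if_pos ((endswith_und_iff hw hw).2 rfl)]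
      rw [if_pos List.mem_cons_self]
      rw [PySem.List.slice_to_neg_natCast _ _ (by simp)]
      rw [show (base ++ '_' :: w).length - ('_' :: w).length = base.length by simp]
      exact List.take_left
    · rw [if_neg (by simp [endswith_und_iff hw hl, fun e : w = last => hwl e])]
      rw [ih fun q hq => hws q (List.mem_cons_of_mem _ hq)]
      have hmem : (last ∈ w :: ws) ↔ (last ∈ ws) := by
        rw [List.mem_cons]
        exact or_iff_right fun e => hwl e.symm
      simp only [hmem]

-- the prefix stage of A equals the partition stage of B, for any name
theorem stagePre_eq (name : List Char) :
    pvForPrefixA name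
      ["dim_".toList, "fact_".toList, "stg_".toList, "raw_".toList,
       "silver_".toList, "gold_".toList, "bronze_".toList] =
    (match pvPartitionUnd name with
     | some (head, rest) => if head ∈ pvPrefixWords then rest else name
     | none => name) := by
  cases hp : pvPartitionUnd name with
  | none =>
    exact loopPre_none (pvPartitionUnd_none hp) _ (by decide)
  | some p =>
    obtain ⟨h, t⟩ := p
    obtain ⟨e, hh⟩ := pvPartitionUnd_some hp
    subst e
    have hlit : ["dim_".toList, "fact_".toList, "stg_".toList, "raw_".toList,
        "silver_".toList, "gold_".toList, "bronze_".toList] =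
        pvPrefixWords.map (· ++ ['_']) := by decide
    rw [hlit, loopPre_some hh pvPrefixWords (by decide)]

-- the suffix stage of A equals the rpartition stage of B, for any name
theorem stageSuf_eq (name : List Char) :
    pvForSuffixA name
      ["_history".toList, "_snapshot".toList, "_latest".toList, "_v2".toList, "_v1".toList] =
    (match pvPartitionUnd name.reverse with
     | some (rlast, rbase) => if rlast.reverse ∈ pvSuffixWords then rbase.reverse else name
     | none => name) := by
  cases hp : pvPartitionUnd name.reverse with
  | none =>
    have : '_' ∉ name := by
      have := pvPartitionUnd_none hp
      simpa using this
    exact loopSuf_none this _ (by decide)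
  | some p =>
    obtain ⟨rlast, rbase⟩ := p
    obtain ⟨e, hh⟩ := pvPartitionUnd_some hp
    have ename : name = rbase.reverse ++ '_' :: rlast.reverse := by
      have := congrArg List.reverse e
      simpa using this
    have hl : '_' ∉ rlast.reverse := by simpa using hh
    have hlit : ["_history".toList, "_snapshot".toList, "_latest".toList,
        "_v2".toList, "_v1".toList] = pvSuffixWords.map ('_' :: ·) := by decide
    rw [ename, hlit, loopSuf_some hl pvSuffixWords (by decide)]

-- ===== VERDICT (by name: the statement is the Claim_ definition above) =====
theorem infer_entity_name_py_spec : Claim_equal_infer_entity_name_py := by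
  intro schema_name table_name _
  show infer_entity_name_py schema_name table_name = infer_entity_name_py_alt schema_name table_name
  unfold infer_entity_name_py infer_entity_name_py_alt
  simp only [stagePre_eq, stageSuf_eq]
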